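-- pv_equiv track=rewrite | github.com/swaym31/cythgen | app.py | chunk_word
-- ===== SOURCE A (Python) =====
-- def chunk_word(s):
--     n = len(s)
--     memo = {}
--     def dfs(i):
--         if i == n: return []
--         if i in memo: return memo[i]
--         if s[i] == "h": memo[i] = None; return None
--         best = None
--         for L in (3, 2, 1):
--             if i + L > n: continue
--             if i + L == n and L == 1 and n > 1: continue
--             suf = dfs(i + L)
--             if suf is None: continue
--             cand = [s[i:i+L]] + suf
--             if best is None: best = cand; continue
--             cl = [len(x) for x in cand]
--             bl = [len(x) for x in best]
--             for k in range(min(len(cl), len(bl))):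
--                 if cl[k] > bl[k]: best = cand; break
--                 if cl[k] < bl[k]: break
--         memo[i] = best; return best
--     return dfs(0) or []
-- ===== SOURCE B (Python) =====
-- def chunk_word(s):
--     n = len(s)
--     # feas[i]: the suffix s[i:] can be chunked into pieces of length 1-3,
--     # no piece starting with 'h', and no final piece of length 1 (unless n == 1).
--     feas = [False] * (n + 1)
--     feas[n] = True
--     for i in range(n - 1, -1, -1):
--         if s[i] == "h":
--             continue
--         for L in (1, 2, 3):
--             if i + L <= n and not (i + L == n and L == 1 and n > 1) and feas[i + L]:
--                 feas[i] = True
--                 break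
--     if not feas[0]:
--         return []
--     out = []
--     i = 0
--     while i < n:
--         for L in (3, 2, 1):
--             if i + L <= n and not (i + L == n and L == 1 and n > 1) and feas[i + L]:
--                 out.append(s[i:i + L])
--                 i += L
--                 break
--     return out
-- ===== Notes on version B (the rewrite author's own statement) =====
-- stated objective: faster
-- what changed: A's memoized top-down search that re-compares full suffix chunk-length lists at every position is replaced by a backward boolean feasibility DP followed by a forward greedy pass that always takes the largest feasible chunk length.
import Mathlib
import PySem

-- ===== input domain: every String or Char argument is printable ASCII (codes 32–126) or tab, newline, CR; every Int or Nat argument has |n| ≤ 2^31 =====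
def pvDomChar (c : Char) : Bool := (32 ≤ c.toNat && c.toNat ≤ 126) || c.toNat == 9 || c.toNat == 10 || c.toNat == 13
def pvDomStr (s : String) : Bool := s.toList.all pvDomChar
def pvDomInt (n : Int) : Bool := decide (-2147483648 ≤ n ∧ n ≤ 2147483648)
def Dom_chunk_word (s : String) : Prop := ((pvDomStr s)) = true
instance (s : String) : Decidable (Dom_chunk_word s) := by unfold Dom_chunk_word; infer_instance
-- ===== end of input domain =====

-- B replaces A's memoized search (which re-compares whole suffix length lists) by a
-- backward boolean feasibility DP plus a forward greedy pass taking the largest feasible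
-- chunk length — same return value on every input.


-- ===== PORT A =====
-- s[i:i+L] on the char list; exact: both bounds are nonnegative (PySem.List.slice_natCast_add).
def pvChunk (cs : List Char) (i L : Nat) : List Char :=
  PySem.List.slice cs (some (i : Int)) (some ((i : Int) + (L : Int)))

-- A's inner comparison loop 'for k in range(min(len(cl), len(bl)))' with its two breaks;
-- true means 'best = cand' fired (len ≥ 0, so Nat order coincides with Python's int order).
def pvCmpReplace : List Nat → List Nat → Bool
  | a :: as, b :: bs => if a > b then true else if a < b then false else pvCmpReplace as bs
  | _, _ => false

-- A's dfs; the memo dict is a pure cache (it never changes any return value), so it is not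
-- threaded through the port; fuel makes the recursion structural (chunk_word passes n+1,
-- which is more than the maximal recursion depth, so fuel 0 is never reached).
def pvDfsA (cs : List Char) (n : Nat) : Nat → Nat → Option (List (List Char))
  | 0, _ => none
  | fuel + 1, i =>
    if i = n then some [] else
    if cs.getD i ' ' = 'h' then none else     -- s[i]: 0 ≤ i < n here, so getD is exact
      [3, 2, 1].foldl (fun best L =>
        if i + L > n then best
        else if i + L = n ∧ L = 1 ∧ n > 1 then best
        else
          match pvDfsA cs n fuel (i + L) with
          | none => best
          | some suf =>
            let cand := pvChunk cs i L :: suf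
            match best with
            | none => some cand
            | some b =>
              if pvCmpReplace (cand.map List.length) (b.map List.length) then some cand
              else best) none

def chunk_word (s : String) : List String :=
  let cs := s.toList
  let n := cs.length
  match pvDfsA cs n (n + 1) 0 with        -- 'return dfs(0) or []' ([] is falsy, so [] stays [])
  | some r => r.map String.mk
  | none => []

-- ===== PORT B =====
-- shared validity test of Source B: i+L <= n and not (i+L == n and L == 1 and n > 1) and feas[i+L]
def pvCond (feas : List Bool) (n i L : Nat) : Bool :=
  decide (i + L ≤ n) && !(decide (i + L = n) && decide (L = 1) && decide (n > 1)) &&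
    feas.getD (i + L) false

-- Source B's backward loop; pvBuildFeas cs n k = [feas[n-k], …, feas[n]]; the positions
-- i+1 … n are exactly the already-computed tail 'rest', so feas[i+L] = rest[L-1].
def pvBuildFeas (cs : List Char) (n : Nat) : Nat → List Bool
  | 0 => [true]
  | k + 1 =>
    let rest := pvBuildFeas cs n k
    let i := n - (k + 1)
    let v :=
      if cs.getD i ' ' = 'h' then false
      else [1, 2, 3].any (fun L =>
        decide (i + L ≤ n) && !(decide (i + L = n) && decide (L = 1) && decide (n > 1)) &&
          rest.getD (L - 1) false)
    v :: rest

-- Source B's forward while loop; fuel = n - i bounds the iterations (i grows by ≥ 1 each turn).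
-- The 'none' branch is unreachable when feas[i] holds (Python would re-test forever there).
def pvGreedy (cs : List Char) (n : Nat) (feas : List Bool) : Nat → Nat → List (List Char)
  | 0, _ => []
  | fuel + 1, i =>
    if i < n then
      match [3, 2, 1].find? (fun L => pvCond feas n i L) with
      | some L => pvChunk cs i L :: pvGreedy cs n feas fuel (i + L)
      | none => []
    else []

def chunk_word_alt (s : String) : List String :=
  let cs := s.toList
  let n := cs.length
  let feas := pvBuildFeas cs n n
  if feas.getD 0 false then (pvGreedy cs n feas n 0).map String.mk else []

-- ===== PRECONDITION & SPEC =====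
def Spec_chunk_word (s : String) (out : List String) : Prop := out = chunk_word_alt s
instance (s : String) (out : List String) : Decidable (Spec_chunk_word s out) := by unfold Spec_chunk_word; infer_instance

-- ===== CLAIM (what is proved, stated in full; the proofs are below) =====
def Claim_equal_chunk_word : Prop := ∀ (s : String), Dom_chunk_word s → Spec_chunk_word s (chunk_word s)

-- ===== LEMMAS AND PROOFS =====

theorem pvChunk_eq (cs : List Char) (i L : Nat) :
    pvChunk cs i L = (cs.drop i).take L := by
  simp [pvChunk, PySem.List.slice_natCast_add]

theorem pvChunk_length (cs : List Char) (i L : Nat) (h : i + L ≤ cs.length) :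
    (pvChunk cs i L).length = L := by
  simp [pvChunk_eq]; omega

theorem pvBuildFeas_shift (cs : List Char) (n : Nat) :
    ∀ m k j, (pvBuildFeas cs n (k + m)).getD (j + m) false
      = (pvBuildFeas cs n k).getD j false := by
  intro m
  induction m with
  | zero => intro k j; rfl
  | succ m ih =>
    intro k j
    have h1 : k + (m + 1) = (k + m) + 1 := by omega
    rw [h1, pvBuildFeas]
    have h2 : j + (m + 1) = (j + m) + 1 := by omega
    rw [h2, List.getD_cons_succ]
    exact ih k j

-- feas[n] = True
theorem feasAt_top (cs : List Char) (n : Nat) :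
    (pvBuildFeas cs n n).getD n false = true := by
  have := pvBuildFeas_shift cs n n 0 0
  simpa using this

theorem feasAt_top' (cs : List Char) (n : Nat) :
    (pvBuildFeas cs n n)[n]?.getD false = true := by
  simpa [List.getD_eq_getElem?_getD] using feasAt_top cs n

-- unfolding of feas[i] for i < n, in terms of feas at i+1 … i+3
theorem feasAt_lt (cs : List Char) (n i : Nat) (h : i < n) :
    (pvBuildFeas cs n n).getD i false
      = if cs.getD i ' ' = 'h' then false
        else (pvCond (pvBuildFeas cs n n) n i 1 || (pvCond (pvBuildFeas cs n n) n i 2 ||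
              pvCond (pvBuildFeas cs n n) n i 3)) := by
  obtain ⟨k, hk⟩ : ∃ k, n = (k + 1) + i := ⟨n - i - 1, by omega⟩
  have hL := pvBuildFeas_shift cs n i (k + 1) 0
  rw [← hk, show 0 + i = i from by omega] at hL
  have hi : n - (k + 1) = i := by omega
  rw [hL, pvBuildFeas]
  simp only [hi, List.getD_cons_zero]
  have t : ∀ j, (pvBuildFeas cs n k).getD j false
      = (pvBuildFeas cs n n).getD (j + (i + 1)) false := by
    intro j
    have hj := pvBuildFeas_shift cs n (i + 1) k j
    rw [show k + (i + 1) = n from by omega] at hj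
    exact hj.symm
  have t1 := t 0; have t2 := t 1; have t3 := t 2
  rw [show (0 : Nat) + (i + 1) = i + 1 from by omega] at t1
  rw [show (1 : Nat) + (i + 1) = i + 2 from by omega] at t2
  rw [show (2 : Nat) + (i + 1) = i + 3 from by omega] at t3
  simp only [List.getD_eq_getElem?_getD] at t1 t2 t3
  by_cases hh : cs.getD i ' ' = 'h'
  · simp only [if_pos hh]
  · simp only [if_neg hh]
    simp [pvCond, t1, t2, t3, List.getD_eq_getElem?_getD, h]

theorem pvGreedy_fuel (cs : List Char) (n : Nat) (feas : List Bool) :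
    ∀ f1 f2 i, n - i ≤ f1 → n - i ≤ f2 →
      pvGreedy cs n feas f1 i = pvGreedy cs n feas f2 i := by
  intro f1
  induction f1 with
  | zero =>
    intro f2 i h1 _
    have hi : ¬ i < n := by omega
    cases f2 with
    | zero => rfl
    | succ f2 => simp [pvGreedy, hi]
  | succ f1 ih =>
    intro f2 i h1 h2
    by_cases hi : i < n
    · obtain ⟨f2', rfl⟩ : ∃ f2', f2 = f2' + 1 := ⟨f2 - 1, by omega⟩
      rw [pvGreedy, pvGreedy]
      simp only [hi, if_true]
      cases hfind : [3, 2, 1].find? (fun L => pvCond feas n i L) with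
      | none => rfl
      | some L =>
        have hmem : L ∈ [3, 2, 1] := List.mem_of_find?_eq_some hfind
        have hL1 : 1 ≤ L := by
          simp [List.mem_cons] at hmem
          rcases hmem with h | h | h <;> omega
        show pvChunk cs i L :: pvGreedy cs n feas f1 (i + L)
            = pvChunk cs i L :: pvGreedy cs n feas f2' (i + L)
        rw [ih f2' (i + L) (by omega) (by omega)]
    · cases f2 with
      | zero => cases f1 <;> simp [pvGreedy, hi]
      | succ f2 => cases f1 <;> simp [pvGreedy, hi]

-- the main invariant: A's dfs(i) = some ⟨greedy chunks from i⟩ iff feas[i], else none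
theorem pvMain (cs : List Char) :
    ∀ fuel i, i ≤ cs.length → cs.length - i < fuel →
      pvDfsA cs cs.length fuel i
        = if (pvBuildFeas cs cs.length cs.length).getD i false
          then some (pvGreedy cs cs.length (pvBuildFeas cs cs.length cs.length)
                      (cs.length - i) i)
          else none := by
  intro fuel
  induction fuel with
  | zero => intro i _ h2; omega
  | succ fuel ih =>
    intro i h1 h2
    by_cases hin : i = cs.length
    · subst hin
      simp [pvDfsA, feasAt_top, feasAt_top', pvGreedy]
    · have hlt : i < cs.length := by omega
      obtain ⟨m, hm⟩ : ∃ m, cs.length - i = m + 1 := ⟨cs.length - i - 1, by omega⟩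
      rw [feasAt_lt cs cs.length i hlt]
      simp only [pvDfsA, if_neg hin]
      by_cases hh : cs.getD i ' ' = 'h'
      · simp only [if_pos hh]
        simp
      · simp only [if_neg hh]
        rw [hm]
        simp only [pvGreedy, if_pos hlt]
        have d1 := ih (i + 1) (by omega) (by omega)
        have g1 : pvGreedy cs cs.length (pvBuildFeas cs cs.length cs.length)
            (cs.length - (i + 1)) (i + 1)
            = pvGreedy cs cs.length (pvBuildFeas cs cs.length cs.length) m (i + 1) :=
          pvGreedy_fuel cs cs.length _ _ m (i + 1) (by omega) (by omega)
        by_cases h3 : i + 3 ≤ cs.length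
        · have h2' : i + 2 ≤ cs.length := by omega
          have e1 : ¬ (i + 1 = cs.length) := by omega
          have d3 := ih (i + 3) (by omega) (by omega)
          have d2 := ih (i + 2) (by omega) (by omega)
          have g3 : pvGreedy cs cs.length (pvBuildFeas cs cs.length cs.length)
              (cs.length - (i + 3)) (i + 3)
              = pvGreedy cs cs.length (pvBuildFeas cs cs.length cs.length) m (i + 3) :=
            pvGreedy_fuel cs cs.length _ _ m (i + 3) (by omega) (by omega)
          have g2 : pvGreedy cs cs.length (pvBuildFeas cs cs.length cs.length)
              (cs.length - (i + 2)) (i + 2)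
              = pvGreedy cs cs.length (pvBuildFeas cs cs.length cs.length) m (i + 2) :=
            pvGreedy_fuel cs cs.length _ _ m (i + 2) (by omega) (by omega)
          have n3 : ¬ (i + 3 > cs.length) := by omega
          have n2 : ¬ (i + 2 > cs.length) := by omega
          have n1 : ¬ (i + 1 > cs.length) := by omega
          have c3 := pvChunk_length cs i 3 h3
          have c2 := pvChunk_length cs i 2 h2'
          have c1 := pvChunk_length cs i 1 (by omega)
          by_cases f3 : (pvBuildFeas cs cs.length cs.length)[i + 3]?.getD false = true <;>
            by_cases f2 : (pvBuildFeas cs cs.length cs.length)[i + 2]?.getD false = true <;>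
            by_cases f1 : (pvBuildFeas cs cs.length cs.length)[i + 1]?.getD false = true <;>
            simp [List.foldl, List.find?, pvCond, pvCmpReplace, List.getD_eq_getElem?_getD,
              d1, d2, d3, g1, g2, g3, n1, n2, n3, h3, h2', e1, c1, c2, c3, f1, f2, f3, hlt]
        · by_cases h2' : i + 2 ≤ cs.length
          · -- here cs.length = i + 2
            have e1 : ¬ (i + 1 = cs.length) := by omega
            have d2 := ih (i + 2) (by omega) (by omega)
            have g2 : pvGreedy cs cs.length (pvBuildFeas cs cs.length cs.length)
                (cs.length - (i + 2)) (i + 2)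
                = pvGreedy cs cs.length (pvBuildFeas cs cs.length cs.length) m (i + 2) :=
              pvGreedy_fuel cs cs.length _ _ m (i + 2) (by omega) (by omega)
            have n3 : i + 3 > cs.length := by omega
            have n2 : ¬ (i + 2 > cs.length) := by omega
            have n1 : ¬ (i + 1 > cs.length) := by omega
            have c2 := pvChunk_length cs i 2 h2'
            have c1 := pvChunk_length cs i 1 (by omega)
            by_cases f2 : (pvBuildFeas cs cs.length cs.length)[i + 2]?.getD false = true <;>
              by_cases f1 : (pvBuildFeas cs cs.length cs.length)[i + 1]?.getD false = true <;>
              simp [List.foldl, List.find?, pvCond, pvCmpReplace, List.getD_eq_getElem?_getD,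
                d1, d2, g1, g2, n1, n2, n3, h3, h2', e1, c1, c2, f1, f2, hlt]
          · -- here cs.length = i + 1
            have e1 : i + 1 = cs.length := by omega
            have n3 : i + 3 > cs.length := by omega
            have n2 : i + 2 > cs.length := by omega
            have n1 : ¬ (i + 1 > cs.length) := by omega
            have c1 := pvChunk_length cs i 1 (by omega)
            by_cases en : cs.length > 1
            · simp [List.foldl, List.find?, pvCond, List.getD_eq_getElem?_getD, d1, n1, n2, n3, e1, en, hlt]
            · have hm0 : m = 0 := by omega
              have dn : pvDfsA cs cs.length fuel cs.length = some [] := by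
                rw [ih cs.length (by omega) (by omega), if_pos (feasAt_top cs cs.length),
                  Nat.sub_self]
                rfl
              have ft := feasAt_top' cs cs.length
              simp [List.foldl, List.find?, pvCond, List.getD_eq_getElem?_getD,
                n1, n2, n3, e1, en, c1, hlt, hm0, dn, ft, h3, h2', pvGreedy]

-- ===== VERDICT (by name: the statement is the Claim_ definition above) =====
theorem chunk_word_spec : Claim_equal_chunk_word := by
  intro s _
  unfold Spec_chunk_word chunk_word chunk_word_alt
  have h := pvMain s.toList (s.toList.length + 1) 0 (by omega) (by omega)
  simp only [h]
  by_cases hf : (pvBuildFeas s.toList s.toList.length s.toList.length).getD 0 false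
  · rw [if_pos hf, if_pos hf]
    show (pvGreedy s.toList s.toList.length _ (s.toList.length - 0) 0).map String.mk
        = (pvGreedy s.toList s.toList.length _ s.toList.length 0).map String.mk
    rw [pvGreedy_fuel s.toList s.toList.length _ (s.toList.length - 0) s.toList.length 0
      (by omega) (by omega)]
  · rw [if_neg hf, if_neg hf]
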